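-- pv_equiv track=rewrite | github.com/gautetk/AoC-2021 | src/day5.py | findVentLocations
-- ===== SOURCE A (Python) =====
-- def findVentLocations(vl, part):
--     x1, y1, x2, y2 = vl
--
--     xRange = ventRange(x1, x2)
--     yRange = ventRange(y1, y2)
--
--     if x1 == x2:
--         xRange = xRange * len(yRange)
--
--     elif y1 == y2:
--         yRange = yRange * len(xRange)
--
--     else:
--         if part == 1:
--             return []
--
--     return[(x, y) for x, y in zip(xRange, yRange)]
--
-- def ventRange(v1, v2):
--     if v1 > v2:
--         angle = -1
--     else:
--         angle = 1
--     return [r for r in range(v1, v2 + angle, angle)]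
-- ===== SOURCE B (Python) =====
-- def findVentLocations(vl, part):
--     x1, y1, x2, y2 = vl
--     dx, dy = x2 - x1, y2 - y1
--     sx = (dx > 0) - (dx < 0)
--     sy = (dy > 0) - (dy < 0)
--     if dx == 0:
--         n = abs(dy) + 1
--     elif dy == 0:
--         n = abs(dx) + 1
--     elif part == 1:
--         return []
--     else:
--         n = min(abs(dx), abs(dy)) + 1
--     return [(x1 + i * sx, y1 + i * sy) for i in range(n)]
-- ===== Notes on version B (the rewrite author's own statement) =====
-- stated objective: simpler
-- what changed: B replaces A's build-two-ranges, pad-the-constant-one-by-list-multiplication and zip-truncate pipeline with a single index-stepped generation: sign steps sx,sy, a point count n from the branch rules (min(|dx|,|dy|)+1 on diagonals reproduces zip truncation), then one comprehension over range(n).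
import Mathlib
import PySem

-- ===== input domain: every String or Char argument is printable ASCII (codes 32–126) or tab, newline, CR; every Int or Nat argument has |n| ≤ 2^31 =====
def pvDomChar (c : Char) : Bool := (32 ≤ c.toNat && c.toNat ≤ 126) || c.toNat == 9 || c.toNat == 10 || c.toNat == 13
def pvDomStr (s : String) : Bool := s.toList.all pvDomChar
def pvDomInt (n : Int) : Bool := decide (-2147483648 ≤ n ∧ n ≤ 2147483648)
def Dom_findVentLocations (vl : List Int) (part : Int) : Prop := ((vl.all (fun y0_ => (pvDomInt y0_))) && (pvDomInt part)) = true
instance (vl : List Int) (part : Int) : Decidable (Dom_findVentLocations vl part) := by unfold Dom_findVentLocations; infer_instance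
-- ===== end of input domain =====

-- B replaces A's two-ranges/pad/zip pipeline with one index-stepped comprehension (objective: simpler).

-- ===== PORT A =====
-- port of A's helper ventRange: list(range(v1, v2 + angle, angle))
def ventRange (v1 v2 : Int) : List Int :=
  let angle : Int := if v1 > v2 then -1 else 1
  PySem.List.pyRange v1 (v2 + angle) angle

def findVentLocations (vl : List Int) (part : Int) : List (List Int) :=
  match vl with
  | [x1, y1, x2, y2] =>
    let xRange := ventRange x1 x2
    let yRange := ventRange y1 y2
    if x1 == x2 then
      -- xRange * len(yRange)  (Python list repetition; exact for a Nat count)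
      let xRange' := (List.replicate yRange.length xRange).flatten
      (xRange'.zip yRange).map (fun p => [p.1, p.2])
    else if y1 == y2 then
      let yRange' := (List.replicate xRange.length yRange).flatten
      (xRange.zip yRange').map (fun p => [p.1, p.2])
    else if part == 1 then []
    else (xRange.zip yRange).map (fun p => [p.1, p.2])
  | _ => []   -- unreachable: Pre_ requires length 4 (Python unpacking raises otherwise)

-- ===== PORT B =====
-- (dx > 0) - (dx < 0)
def pySign (d : Int) : Int := (if 0 < d then 1 else 0) - (if d < 0 then 1 else 0)

def findVentLocations_alt (vl : List Int) (part : Int) : List (List Int) :=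
  match vl with
  | [] => []   -- unreachable under Pre_
  | x1 :: t1 =>
  match t1 with
  | [] => []
  | y1 :: t2 =>
  match t2 with
  | [] => []
  | x2 :: t3 =>
  match t3 with
  | [] => []
  | y2 :: t4 =>
  match t4 with
  | _ :: _ => []
  | [] =>
    let dx := x2 - x1
    let dy := y2 - y1
    let sx := pySign dx
    let sy := pySign dy
    if dx == 0 then
      (PySem.List.pyRange 0 (dy.natAbs + 1) 1).map (fun i => [x1 + i * sx, y1 + i * sy])
    else if dy == 0 then
      (PySem.List.pyRange 0 (dx.natAbs + 1) 1).map (fun i => [x1 + i * sx, y1 + i * sy])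
    else if part == 1 then []
    else
      (PySem.List.pyRange 0 (min dx.natAbs dy.natAbs + 1) 1).map (fun i => [x1 + i * sx, y1 + i * sy])

-- ===== PRECONDITION & SPEC =====
-- Pre_ excludes exactly the inputs where Python's 'x1, y1, x2, y2 = vl' raises ValueError (len(vl) ≠ 4).
def Pre_findVentLocations (vl : List Int) (part : Int) : Prop := vl.length = 4
instance (vl : List Int) (part : Int) : Decidable (Pre_findVentLocations vl part) := by unfold Pre_findVentLocations; infer_instance
def pvWitness_findVentLocations : List Int × Int := ([0, 9, 5, 9], 2)

def Spec_findVentLocations (vl : List Int) (part : Int) (out : List (List Int)) : Prop := out = findVentLocations_alt vl part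
instance (vl : List Int) (part : Int) (out : List (List Int)) : Decidable (Spec_findVentLocations vl part out) := by unfold Spec_findVentLocations; infer_instance

-- ===== CLAIM (what is proved, stated in full; the proofs are below) =====
def Claim_equal_findVentLocations : Prop := ∀ (vl : List Int) (part : Int), Dom_findVentLocations vl part → Pre_findVentLocations vl part → Spec_findVentLocations vl part (findVentLocations vl part)

-- ===== LEMMAS AND PROOFS =====

theorem flatten_replicate_singleton {α : Type} (n : Nat) (x : α) :
    (List.replicate n [x]).flatten = List.replicate n x := by
  induction n with
  | zero => rfl
  | succ n ih => simp [List.replicate_succ, ih]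

theorem zip_map_range {α β : Type} (a b : Nat) (f : Nat → α) (g : Nat → β) :
    ((List.range a).map f).zip ((List.range b).map g)
      = (List.range (min a b)).map (fun k => (f k, g k)) := by
  apply List.ext_getElem
  · simp
  · intro i h1 h2
    simp [List.getElem_zip]

theorem pySign_zero : pySign 0 = 0 := by unfold pySign; simp

theorem ventRange_self (v : Int) : ventRange v v = [v] := by
  unfold ventRange
  rw [if_neg (lt_irrefl v), PySem.List.pyRange_one]
  have h : (v + 1 - v).toNat = 1 := by omega
  rw [h, List.range_one]
  simp

-- A's ventRange as a map over an index range with the sign step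
theorem ventRange_eq (v1 v2 : Int) :
    ventRange v1 v2 =
      (List.range ((v2 - v1).natAbs + 1)).map (fun (k : Nat) => v1 + (k : Int) * pySign (v2 - v1)) := by
  unfold ventRange
  by_cases h : v1 > v2
  · rw [if_pos h, PySem.List.pyRange_neg_one]
    have h1 : (v1 - (v2 + -1)).toNat = (v2 - v1).natAbs + 1 := by omega
    rw [h1]
    have hs : pySign (v2 - v1) = -1 := by
      unfold pySign; rw [if_neg (by omega), if_pos (by omega)]; norm_num
    rw [hs]
    exact List.map_congr_left (fun k _ => by ring)
  · by_cases he : v1 = v2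
    · subst he
      have h1 : (v1 - v1).natAbs + 1 = 1 := by omega
      rw [h1, List.range_one]
      simp
    · rw [if_neg h, PySem.List.pyRange_one]
      have h1 : (v2 + 1 - v1).toNat = (v2 - v1).natAbs + 1 := by omega
      rw [h1]
      have hs : pySign (v2 - v1) = 1 := by
        unfold pySign; rw [if_pos (by omega), if_neg (by omega)]; norm_num
      rw [hs]
      exact List.map_congr_left (fun k _ => by ring)

-- B's comprehension as a map over List.range
theorem alt_comp (x1 y1 sx sy : Int) (n : Nat) :
    (PySem.List.pyRange 0 ((n : Int) + 1) 1).map (fun i => [x1 + i * sx, y1 + i * sy])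
      = (List.range (n + 1)).map (fun (k : Nat) => [x1 + (k : Int) * sx, y1 + (k : Int) * sy]) := by
  rw [PySem.List.pyRange_one]
  have h1 : ((n : Int) + 1 - 0).toNat = n + 1 := by omega
  rw [h1, List.map_map]
  exact List.map_congr_left (fun k _ => by simp)

-- ===== VERDICT (by name: the statement is the Claim_ definition above) =====
theorem findVentLocations_spec : Claim_equal_findVentLocations := by
  intro vl part hdom hpre
  unfold Spec_findVentLocations
  obtain ⟨x1, y1, x2, y2, rfl⟩ : ∃ a b c d, vl = [a, b, c, d] := by
    rcases vl with _ | ⟨a, _ | ⟨b, _ | ⟨c, _ | ⟨d, _ | _⟩⟩⟩⟩ <;>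
      simp_all [Pre_findVentLocations]
  simp only [findVentLocations, findVentLocations_alt]
  by_cases hx : x1 = x2
  · subst hx
    rw [if_pos (show (x1 == x1) = true by simp)]
    rw [show x1 - x1 = (0 : Int) by ring]
    rw [if_pos (show ((0 : Int) == 0) = true by simp)]
    rw [pySign_zero, ventRange_self, flatten_replicate_singleton,
        ventRange_eq y1 y2, List.length_map, List.length_range]
    rw [show List.replicate ((y2 - y1).natAbs + 1) x1
          = (List.range ((y2 - y1).natAbs + 1)).map (fun (_ : Nat) => x1) by
        simp [List.map_const', List.length_range]]
    rw [zip_map_range, min_self, alt_comp, List.map_map]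
    exact List.map_congr_left (fun k _ => by simp)
  · by_cases hy : y1 = y2
    · subst hy
      rw [if_neg (show ¬ (x1 == x2) = true by simp [hx])]
      rw [if_pos (show (y1 == y1) = true by simp)]
      rw [if_neg (show ¬ (x2 - x1 == 0) = true by simp; omega)]
      rw [show y1 - y1 = (0 : Int) by ring]
      rw [if_pos (show ((0 : Int) == 0) = true by simp)]
      rw [pySign_zero, ventRange_self, flatten_replicate_singleton,
          ventRange_eq x1 x2, List.length_map, List.length_range]
      rw [show List.replicate ((x2 - x1).natAbs + 1) y1
            = (List.range ((x2 - x1).natAbs + 1)).map (fun (_ : Nat) => y1) by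
          simp [List.map_const', List.length_range]]
      rw [zip_map_range, min_self, alt_comp, List.map_map]
      exact List.map_congr_left (fun k _ => by simp)
    · rw [if_neg (show ¬ (x1 == x2) = true by simp [hx])]
      rw [if_neg (show ¬ (y1 == y2) = true by simp [hy])]
      rw [if_neg (show ¬ (x2 - x1 == 0) = true by simp; omega)]
      rw [if_neg (show ¬ (y2 - y1 == 0) = true by simp; omega)]
      by_cases hp : part = 1
      · rw [if_pos (show (part == 1) = true by simp [hp]),
            if_pos (show (part == 1) = true by simp [hp])]
      · rw [if_neg (show ¬ (part == 1) = true by simp [hp]),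
            if_neg (show ¬ (part == 1) = true by simp [hp])]
        rw [ventRange_eq x1 x2, ventRange_eq y1 y2, zip_map_range]
        have hmin : min ((x2 - x1).natAbs + 1) ((y2 - y1).natAbs + 1)
            = min (x2 - x1).natAbs (y2 - y1).natAbs + 1 := by omega
        rw [hmin, alt_comp, List.map_map]
        rfl
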